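-- pv_equiv track=rewrite | github.com/ericka-cespedes/IntroProgrammingPY | 4.py | digitosAuxA
-- ===== SOURCE A (Python) =====
-- def digitosAuxA(dig, num):
--     if num==0:
--         return 0
--     else:
--         if num%10>dig:
--             return num%10 + 10*(digitosAuxA(dig, num//10))
--         else:
--             return digitosAuxA(dig, num//10)
-- ===== SOURCE B (Python) =====
-- def digitosAuxA(dig, num):
--     # Stage 1: explode num into its digits, least-significant first.
--     digits = []
--     while num != 0:
--         digits.append(num % 10)
--         num //= 10
--     # Stage 2: keep only the digits greater than dig.
--     kept = [d for d in digits if d > dig]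
--     # Stage 3: rebuild the number from the kept digits (most-significant first).
--     result = 0
--     for d in reversed(kept):
--         result = result * 10 + d
--     return result
-- ===== Notes on version B (the rewrite author's own statement) =====
-- stated objective: alternative
-- what changed: Replaced the single recursive rebuild with three staged passes: explode num into a least-significant-first digit list, filter the digits greater than dig, then fold the kept list back into a number; the recursion disappears entirely.
import Mathlib
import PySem

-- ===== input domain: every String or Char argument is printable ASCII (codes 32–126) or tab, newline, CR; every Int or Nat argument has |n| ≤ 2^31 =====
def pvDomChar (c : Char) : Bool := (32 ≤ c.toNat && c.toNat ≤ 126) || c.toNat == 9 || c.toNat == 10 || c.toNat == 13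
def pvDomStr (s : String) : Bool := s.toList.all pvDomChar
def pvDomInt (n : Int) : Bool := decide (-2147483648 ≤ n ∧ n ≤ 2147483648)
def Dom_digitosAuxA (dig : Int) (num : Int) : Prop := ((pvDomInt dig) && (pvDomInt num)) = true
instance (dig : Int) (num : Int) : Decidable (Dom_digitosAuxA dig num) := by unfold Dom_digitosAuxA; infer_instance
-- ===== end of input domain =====

-- B replaces A's recursion by three staged list passes (explode digits, filter, rebuild); same cost, no recursion.
-- Both Pythons diverge for negative num (num//10 stabilises at -1), so Pre_ restricts to num ≥ 0.

-- ===== PORT A =====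
-- fuel makes the recursion total in Lean; num.toNat+1 steps suffice for every num ≥ 0 (the only inputs claimed)
def digAFuel : Nat → Int → Int → Int
  | 0, _, _ => 0
  | f+1, dig, num =>
    if num = 0 then 0
    else if PySem.Int.mod num 10 > dig then
      PySem.Int.mod num 10 + 10 * digAFuel f dig (PySem.Int.floordiv num 10)
    else
      digAFuel f dig (PySem.Int.floordiv num 10)

def digitosAuxA (dig : Int) (num : Int) : Int := digAFuel (num.toNat + 1) dig num

-- ===== PORT B =====
-- stage 1 of Source B: the digit list, least-significant first (fuel = the while-loop's termination for num ≥ 0)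
def digExplode : Nat → Int → List Int
  | 0, _ => []
  | f+1, num =>
    if num = 0 then []
    else PySem.Int.mod num 10 :: digExplode f (PySem.Int.floordiv num 10)

-- stages 2 and 3 of Source B: filter the kept digits, then the reversed rebuild loop (= foldr on the LSB-first list)
def digitosAuxA_alt (dig : Int) (num : Int) : Int :=
  ((digExplode (num.toNat + 1) num).filter (fun d => d > dig)).foldr (fun d acc => acc * 10 + d) 0

-- ===== PRECONDITION & SPEC =====
-- Pre_ excludes num < 0, on which the Python A (and B) recurse/loop forever (RecursionError / divergence)
def Pre_digitosAuxA (dig : Int) (num : Int) : Prop := 0 ≤ num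
instance (dig : Int) (num : Int) : Decidable (Pre_digitosAuxA dig num) := by unfold Pre_digitosAuxA; infer_instance
def pvWitness_digitosAuxA : Int × Int := (3, 247)

def Spec_digitosAuxA (dig : Int) (num : Int) (out : Int) : Prop := out = digitosAuxA_alt dig num
instance (dig : Int) (num : Int) (out : Int) : Decidable (Spec_digitosAuxA dig num out) := by unfold Spec_digitosAuxA; infer_instance

-- ===== CLAIM (what is proved, stated in full; the proofs are below) =====
def Claim_equal_digitosAuxA : Prop := ∀ (dig : Int) (num : Int), Dom_digitosAuxA dig num → Pre_digitosAuxA dig num → Spec_digitosAuxA dig num (digitosAuxA dig num)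

-- ===== LEMMAS AND PROOFS =====

lemma digAFuel_eq_foldr (f : Nat) : ∀ (dig num : Int),
    digAFuel f dig num =
      ((digExplode f num).filter (fun d => d > dig)).foldr (fun d acc => acc * 10 + d) 0 := by
  induction f with
  | zero => intro dig num; simp [digAFuel, digExplode]
  | succ f ih =>
    intro dig num
    by_cases hz : num = 0
    · simp [digAFuel, digExplode, hz]
    · by_cases hd : PySem.Int.mod num 10 > dig
      · simp only [digAFuel, digExplode, if_neg hz, if_pos hd, List.filter_cons,
          ih]
        rw [if_pos (by simpa using hd), List.foldr_cons]
        ring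
      · simp only [digAFuel, digExplode, if_neg hz, if_neg hd, List.filter_cons]
        rw [if_neg (by simpa using hd)]
        exact ih dig _

-- ===== VERDICT (by name: the statement is the Claim_ definition above) =====
theorem digitosAuxA_spec : Claim_equal_digitosAuxA := by
  intro dig num _ _
  unfold Spec_digitosAuxA digitosAuxA digitosAuxA_alt
  exact digAFuel_eq_foldr _ dig num
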